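-- pv_equiv track=rewrite | github.com/Zeeeepa/code-scalpel | src/code_scalpel/mcp/helpers/security_helpers.py | _ts_to_python_type
-- ===== SOURCE A (Python) =====
-- def _ts_to_python_type(ts_type: str) -> str:
--     """Convert TypeScript type to Python type annotation."""
--     ts_type = ts_type.strip()
--     mapping = {
--         "string": "str",
--         "number": "float",
--         "boolean": "bool",
--         "null": "None",
--         "undefined": "None",
--         "any": "Any",
--     }
--
--     if ts_type.endswith("[]"):
--         inner = ts_type[:-2]
--         return f"list[{_ts_to_python_type(inner)}]"
--
--     return mapping.get(ts_type, "Any")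
-- ===== SOURCE B (Python) =====
-- def _ts_to_python_type(ts_type: str) -> str:
--     """Convert TypeScript type to Python type annotation (iterative)."""
--     t = ts_type.strip()
--     depth = 0
--     while t.endswith("[]"):
--         t = t[:-2].strip()
--         depth += 1
--     result = {
--         "string": "str",
--         "number": "float",
--         "boolean": "bool",
--         "null": "None",
--         "undefined": "None",
--         "any": "Any",
--     }.get(t, "Any")
--     for _ in range(depth):
--         result = f"list[{result}]"
--     return result
-- ===== Notes on version B (the rewrite author's own statement) =====
-- stated objective: alternative
-- what changed: Replaces A's suffix recursion by a single iterative pass that strips and counts the trailing array-suffix pairs, then does one dict lookup and a loop wrapping the result in the list annotation that many times.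
import Mathlib
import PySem

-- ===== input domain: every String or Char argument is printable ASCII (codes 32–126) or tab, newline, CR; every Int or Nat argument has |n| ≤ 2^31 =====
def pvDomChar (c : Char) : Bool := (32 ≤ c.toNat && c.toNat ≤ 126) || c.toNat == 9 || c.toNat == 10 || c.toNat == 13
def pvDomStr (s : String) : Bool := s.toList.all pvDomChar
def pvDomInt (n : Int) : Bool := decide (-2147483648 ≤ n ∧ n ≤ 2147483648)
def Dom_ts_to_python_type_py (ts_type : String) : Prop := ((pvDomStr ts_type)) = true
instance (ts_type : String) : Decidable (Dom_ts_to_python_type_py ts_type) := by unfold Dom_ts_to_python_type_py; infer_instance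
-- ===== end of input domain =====

-- B replaces A's suffix recursion by one iterative peeling pass plus a wrap loop (different decomposition, same cost).

-- the type-name table both Pythons carry literally
def tsMapping : PySem.Dict String String :=
  ((((((PySem.Dict.empty.insert "string" "str").insert "number" "float").insert "boolean" "bool").insert
      "null" "None").insert "undefined" "None").insert "any" "Any")

-- length facts needed by the ports' own termination (cited in decreasing_by)
theorem tsStrip_len_le (cs : List Char) : (PySem.Chars.strip cs).length ≤ cs.length := by
  simp only [PySem.Chars.strip, PySem.Chars.rstrip, PySem.Chars.lstrip, List.length_reverse]
  exact le_trans (List.dropWhile_sublist _).length_le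
    (by simpa using (List.dropWhile_sublist (l := cs) (p := PySem.Chars.isspace)).length_le)

theorem tsSlice2_len (t : List Char) : (PySem.Chars.slice t none (some (-2))).length = t.length - 2 := by
  simp [PySem.List.slice]

theorem tsEndswith_two_le {t : List Char} (h : PySem.Chars.endswith t ['[', ']'] = true) :
    2 ≤ t.length := by
  simpa using ((PySem.Chars.endswith_iff t ['[', ']']).mp h).length_le

-- ===== PORT A =====
def tsAGo (cs : List Char) : List Char :=
  let t := PySem.Chars.strip cs
  if h : PySem.Chars.endswith t ['[', ']'] then
    'l' :: 'i' :: 's' :: 't' :: '[' :: (tsAGo (PySem.Chars.slice t none (some (-2))) ++ [']'])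
  else (tsMapping.getD (String.ofList t) "Any").toList
termination_by cs.length
decreasing_by
  have h1 := tsStrip_len_le cs
  have h2 := tsEndswith_two_le h
  have h3 := tsSlice2_len t
  simp only [t] at h2 h3 ⊢
  simp only [PySem.Chars.slice_eq_listSlice] at h3 ⊢
  omega

def ts_to_python_type_py (ts_type : String) : String := String.ofList (tsAGo ts_type.toList)

-- ===== PORT B =====
def tsBPeel (t : List Char) (depth : Nat) : List Char × Nat :=
  if h : PySem.Chars.endswith t ['[', ']'] then
    tsBPeel (PySem.Chars.strip (PySem.Chars.slice t none (some (-2)))) (depth + 1)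
  else (t, depth)
termination_by t.length
decreasing_by
  have h1 := tsStrip_len_le (PySem.Chars.slice t none (some (-2)))
  have h2 := tsEndswith_two_le h
  have h3 := tsSlice2_len t
  omega

def ts_to_python_type_py_alt (ts_type : String) : String :=
  let p := tsBPeel (PySem.Chars.strip ts_type.toList) 0
  String.ofList ((List.range p.2).foldl
    (fun r _ => 'l' :: 'i' :: 's' :: 't' :: '[' :: (r ++ [']']))
    ((tsMapping.getD (String.ofList p.1) "Any").toList))

-- ===== PRECONDITION & SPEC =====
def Spec_ts_to_python_type_py (ts_type : String) (out : String) : Prop := out = ts_to_python_type_py_alt ts_type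
instance (ts_type : String) (out : String) : Decidable (Spec_ts_to_python_type_py ts_type out) := by unfold Spec_ts_to_python_type_py; infer_instance

-- ===== CLAIM (what is proved, stated in full; the proofs are below) =====
def Claim_equal_ts_to_python_type_py : Prop := ∀ (ts_type : String), Dom_ts_to_python_type_py ts_type → Spec_ts_to_python_type_py ts_type (ts_to_python_type_py ts_type)

-- ===== LEMMAS AND PROOFS =====

-- the depth accumulator of B's peeling loop only shifts the returned count
theorem tsBPeel_shift (n : Nat) : ∀ t : List Char, t.length ≤ n → ∀ d : Nat,
    tsBPeel t d = ((tsBPeel t 0).1, (tsBPeel t 0).2 + d) := by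
  induction n with
  | zero =>
    intro t ht d
    have h0 : t = [] := List.eq_nil_of_length_eq_zero (Nat.le_zero.mp ht)
    subst h0
    have he : PySem.Chars.endswith ([] : List Char) ['[', ']'] = false := by rfl
    conv_lhs => rw [tsBPeel.eq_def]
    conv_rhs => rw [tsBPeel.eq_def]
    simp [he]
  | succ n ih =>
    intro t ht d
    conv_lhs => rw [tsBPeel.eq_def]
    conv_rhs => rw [tsBPeel.eq_def]
    by_cases h : PySem.Chars.endswith t ['[', ']'] = true
    · simp only [h, dif_pos]
      have h2 := tsEndswith_two_le h
      have hlen : (PySem.Chars.strip (PySem.Chars.slice t none (some (-2)))).length ≤ n := by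
        have := tsStrip_len_le (PySem.Chars.slice t none (some (-2)))
        have := tsSlice2_len t
        omega
      rw [ih _ hlen (d + 1), ih _ hlen 1]
      simp only [Prod.mk.injEq, true_and]
      omega
    · simp [h]

-- A's recursion computes exactly B's peel-then-wrap result
theorem tsA_eq_wrap (n : Nat) : ∀ cs : List Char, cs.length ≤ n →
    tsAGo cs =
      (List.range (tsBPeel (PySem.Chars.strip cs) 0).2).foldl
        (fun r _ => 'l' :: 'i' :: 's' :: 't' :: '[' :: (r ++ [']']))
        ((tsMapping.getD (String.ofList (tsBPeel (PySem.Chars.strip cs) 0).1) "Any").toList) := by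
  induction n with
  | zero =>
    intro cs hcs
    have h0 : cs = [] := List.eq_nil_of_length_eq_zero (Nat.le_zero.mp hcs)
    subst h0
    have hs : PySem.Chars.strip ([] : List Char) = [] := by rfl
    have he : PySem.Chars.endswith ([] : List Char) ['[', ']'] = false := by rfl
    rw [tsAGo.eq_def, tsBPeel.eq_def]
    simp [hs, he]
  | succ n ih =>
    intro cs hcs
    rw [tsAGo.eq_def, tsBPeel.eq_def]
    by_cases h : PySem.Chars.endswith (PySem.Chars.strip cs) ['[', ']'] = true
    · simp only [h, dif_pos]
      set s := PySem.Chars.slice (PySem.Chars.strip cs) none (some (-2)) with hs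
      have h2 := tsEndswith_two_le h
      have hslen : s.length ≤ n := by
        have := tsStrip_len_le cs
        have h3 := tsSlice2_len (PySem.Chars.strip cs)
        rw [← hs] at h3
        omega
      rw [tsBPeel_shift (PySem.Chars.strip s).length (PySem.Chars.strip s) le_rfl 1]
      rw [ih s hslen]
      simp [List.range_succ]
    · simp [h]

-- ===== VERDICT (by name: the statement is the Claim_ definition above) =====
theorem ts_to_python_type_py_spec : Claim_equal_ts_to_python_type_py := by
  intro ts_type _
  unfold Spec_ts_to_python_type_py ts_to_python_type_py ts_to_python_type_py_alt
  rw [tsA_eq_wrap ts_type.toList.length ts_type.toList le_rfl]
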